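-- pv_equiv track=rewrite | github.com/T-travis/data_structures_and_algorithms | problem-solving-patterns/frequency/is_same_frequency.py | is_same_frequency
-- ===== SOURCE A (Python) =====
-- def is_same_frequency(int1, int2):
--     # check if null, not int type, or negative number
--     if int1 is None or int2 is None or not isinstance(int1, int) or not isinstance(int2, int):
--         raise TypeError
--     if int1 < 0 or int2 < 0:
--         raise ValueError
--
--     int1_frequency = make_frequency(int1)
--     int2_frequency = make_frequency(int2)
--     if len(int1_frequency) <= 0 or len(int1_frequency) != len(int2_frequency):
--         return False
--     for key in int1_frequency:
--         if key not in int2_frequency or int1_frequency[key] != int2_frequency[key]: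
--             return False
--
--     return True
--
-- def make_frequency(num):
--     frequency = {}
--     if num < 0:
--         num = -1 * num
--     while num // 10 != 0:
--         right_digit = num % 10
--         if right_digit in frequency:
--             frequency[right_digit] = frequency[right_digit] + 1
--         else:
--             frequency[right_digit] = 1
--         num = num // 10
--     right_digit = num % 10
--     if right_digit in frequency:
--         frequency[right_digit] = frequency[right_digit] + 1
--     else:
--         frequency[right_digit] = 1
--     return frequency
-- ===== SOURCE B (Python) =====
-- def is_same_frequency(int1, int2):
--     # same validation as the original (TypeError then ValueError, same order)
--     if int1 is None or int2 is None or not isinstance(int1, int) or not isinstance(int2, int):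
--         raise TypeError
--     if int1 < 0 or int2 < 0:
--         raise ValueError
--     # canonical form: sorted digit characters (int() so bool inputs act as their int value)
--     return sorted(str(int(int1))) == sorted(str(int(int2)))
-- ===== Notes on version B (the rewrite author's own statement) =====
-- stated objective: simpler
-- what changed: Replaces the digit-peeling frequency dicts and key-by-key comparison with one line comparing the sorted digit strings of the two numbers.
import Mathlib
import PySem

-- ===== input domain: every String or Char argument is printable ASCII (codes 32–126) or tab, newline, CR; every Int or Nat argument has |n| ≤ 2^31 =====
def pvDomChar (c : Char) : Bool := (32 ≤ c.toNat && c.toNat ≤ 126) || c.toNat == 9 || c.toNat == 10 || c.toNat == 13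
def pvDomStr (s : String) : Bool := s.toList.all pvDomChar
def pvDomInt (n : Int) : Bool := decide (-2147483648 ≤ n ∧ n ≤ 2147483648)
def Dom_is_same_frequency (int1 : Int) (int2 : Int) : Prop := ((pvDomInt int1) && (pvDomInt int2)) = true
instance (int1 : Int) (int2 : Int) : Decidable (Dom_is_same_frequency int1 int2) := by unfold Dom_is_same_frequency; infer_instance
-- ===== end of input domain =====

-- B replaces A's digit-frequency dicts and key-by-key comparison with a one-line
-- comparison of the sorted digit strings of the two numbers (objective: simpler).

-- ===== PORT A =====

-- the repeated 'if right_digit in frequency: f[d]+=1 else f[d]=1' block of make_frequency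
def pvAddDigit (f : PySem.Dict Int Int) (d : Int) : PySem.Dict Int Int :=
  if f.contains d then f.insert d (f.getD d 0 + 1) else f.insert d 1

-- the while loop of make_frequency; its num is non-negative there (Python negates first),
-- so Nat '/' and '%' are exactly Python's '//' and '%' on this domain
def pvMfLoop (n : Nat) (f : PySem.Dict Int Int) : Nat × PySem.Dict Int Int :=
  if n / 10 = 0 then (n, f)
  else pvMfLoop (n / 10) (pvAddDigit f ((n % 10 : Nat) : Int))
  termination_by n
  decreasing_by exact Nat.div_lt_self (by omega) (by omega)

def make_frequency (num : Int) : PySem.Dict Int Int :=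
  let n : Nat := (if num < 0 then (-1) * num else num).toNat
  let r := pvMfLoop n PySem.Dict.empty
  pvAddDigit r.2 ((r.1 % 10 : Nat) : Int)

def is_same_frequency (int1 : Int) (int2 : Int) : Bool :=
  let f1 := make_frequency int1
  let f2 := make_frequency int2
  if f1.size ≤ 0 || f1.size != f2.size then false
  else f1.keys.all (fun k => f2.contains k && (f1.getD k 0 == f2.getD k 0))

-- ===== PORT B =====

-- sorted(str(int(int1))) == sorted(str(int(int2)))
def is_same_frequency_alt (int1 : Int) (int2 : Int) : Bool :=
  (PySem.List.sorted (PySem.Int.toChars int1) (fun c => c) false)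
    == (PySem.List.sorted (PySem.Int.toChars int2) (fun c => c) false)

-- ===== PRECONDITION & SPEC =====

-- A raises TypeError/ValueError only outside this: negative inputs raise ValueError
def Pre_is_same_frequency (int1 : Int) (int2 : Int) : Prop := 0 ≤ int1 ∧ 0 ≤ int2
instance (int1 : Int) (int2 : Int) : Decidable (Pre_is_same_frequency int1 int2) := by
  unfold Pre_is_same_frequency; infer_instance

def pvWitness_is_same_frequency : Int × Int := (120, 21)

def Spec_is_same_frequency (int1 : Int) (int2 : Int) (out : Bool) : Prop := out = is_same_frequency_alt int1 int2
instance (int1 : Int) (int2 : Int) (out : Bool) : Decidable (Spec_is_same_frequency int1 int2 out) := by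
  unfold Spec_is_same_frequency; infer_instance

-- ===== CLAIM (what is proved, stated in full; the proofs are below) =====
def Claim_equal_is_same_frequency : Prop := ∀ (int1 : Int) (int2 : Int), Dom_is_same_frequency int1 int2 → Pre_is_same_frequency int1 int2 → Spec_is_same_frequency int1 int2 (is_same_frequency int1 int2)

-- ===== LEMMAS AND PROOFS =====

-- the digit values of n, least significant first (0 has one digit)
def pvDigits (n : Nat) : List Nat :=
  if n / 10 = 0 then [n % 10]
  else n % 10 :: pvDigits (n / 10)
  termination_by n
  decreasing_by exact Nat.div_lt_self (by omega) (by omega)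

lemma pvDigits_ne_nil (n : Nat) : pvDigits n ≠ [] := by
  rw [pvDigits]; split <;> simp

lemma pvDigits_lt_ten (n : Nat) : ∀ d ∈ pvDigits n, d < 10 := by
  induction n using pvDigits.induct with
  | case1 n h =>
    rw [pvDigits, if_pos h]
    intro d hd
    rw [List.mem_singleton] at hd
    omega
  | case2 n h ih =>
    rw [pvDigits, if_neg h]
    intro d hd
    rcases List.mem_cons.mp hd with rfl | hd'
    · omega
    · exact ih d hd' 

lemma pvAddDigit_eq (f : PySem.Dict Int Int) (d : Int) :
    pvAddDigit f d = f.insert d (f.getD d 0 + 1) := by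
  unfold pvAddDigit
  by_cases h : f.contains d = true
  · simp [h]
  · simp only [Bool.not_eq_true] at h
    simp [h, PySem.Dict.getD_of_not_contains f 0 h]

lemma pvMfLoop_spec (n : Nat) (f : PySem.Dict Int Int) :
    pvAddDigit (pvMfLoop n f).2 (((pvMfLoop n f).1 % 10 : Nat) : Int)
      = ((pvDigits n).map (fun (d : Nat) => (d : Int))).foldl pvAddDigit f := by
  induction n using pvDigits.induct generalizing f with
  | case1 n h =>
    rw [pvMfLoop, if_pos h, pvDigits, if_pos h]
    simp
  | case2 n h ih =>
    rw [pvMfLoop, if_neg h, pvDigits, if_neg h]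
    rw [List.map_cons, List.foldl_cons]
    exact ih _

lemma make_frequency_eq_counter (num : Int) (h : 0 ≤ num) :
    make_frequency num = PySem.Dict.counter ((pvDigits num.toNat).map (fun (d : Nat) => (d : Int))) := by
  have hneg : ¬ num < 0 := by omega
  unfold make_frequency
  simp only [hneg, if_false]
  rw [pvMfLoop_spec]
  have hfe : pvAddDigit = (fun (d : PySem.Dict Int Int) (x : Int) => d.insert x (d.getD x 0 + 1)) := by
    funext f d; exact pvAddDigit_eq f d
  rw [hfe, PySem.Dict.foldl_insert_getD_add_one_eq_counter]

-- A's comparison of the two counters decides permutation of the digit lists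
lemma counter_cmp_iff (L1 L2 : List Int) (h1 : L1 ≠ []) :
    ((if (PySem.Dict.counter L1).size ≤ 0 ||
          (PySem.Dict.counter L1).size != (PySem.Dict.counter L2).size then false
      else (PySem.Dict.counter L1).keys.all
        (fun k => (PySem.Dict.counter L2).contains k &&
          ((PySem.Dict.counter L1).getD k 0 == (PySem.Dict.counter L2).getD k 0))) = true)
      ↔ L1.Perm L2 := by
  have hsz : ∀ L : List Int, (PySem.Dict.counter L).size = (PySem.Set.ofList L).length := by
    intro L
    have : (PySem.Dict.counter L).keys.length = (PySem.Set.ofList L).length := by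
      rw [PySem.Dict.keys_counter]
    simpa [PySem.Dict.keys, PySem.Dict.size] using this
  constructor
  · intro hA
    by_cases hsize : (PySem.Dict.counter L1).size ≤ 0 ||
        (PySem.Dict.counter L1).size != (PySem.Dict.counter L2).size
    · rw [if_pos hsize] at hA; exact absurd hA (by simp)
    · rw [if_neg hsize] at hA
      simp only [Bool.or_eq_true, not_or, bne_iff_ne, ne_eq, not_not, Bool.not_eq_true] at hsize
      obtain ⟨-, hlen⟩ := hsize
      rw [List.all_eq_true] at hA
      have hkey : ∀ k ∈ L1, k ∈ L2 ∧ L1.count k = L2.count k := by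
        intro k hk
        have hk' : k ∈ (PySem.Dict.counter L1).keys := by
          rw [PySem.Dict.keys_counter, PySem.Set.mem_ofList]; exact hk
        have := hA k hk'
        simp only [Bool.and_eq_true, PySem.Dict.contains_counter, List.contains_eq_mem,
          decide_eq_true_eq, beq_iff_eq, PySem.Dict.getD_counter] at this
        exact ⟨this.1, by exact_mod_cast this.2⟩
      -- the distinct-key lists are permutations: subset + nodup + equal length
      have hsub : PySem.Set.ofList L1 ⊆ PySem.Set.ofList L2 := by
        intro k hk
        rw [PySem.Set.mem_ofList] at hk ⊢
        exact (hkey k hk).1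
      have hperm : (PySem.Set.ofList L1).Perm (PySem.Set.ofList L2) := by
        apply ((PySem.Set.nodup_ofList L1).subperm hsub).perm_of_length_le
        rw [hsz, hsz] at hlen; omega
      rw [List.perm_iff_count]
      intro a
      by_cases ha : a ∈ L1
      · exact (hkey a ha).2
      · have ha2 : a ∉ L2 := by
          intro hc
          have : a ∈ PySem.Set.ofList L1 := by
            rw [hperm.mem_iff, PySem.Set.mem_ofList]; exact hc
          rw [PySem.Set.mem_ofList] at this; exact ha this
        rw [List.count_eq_zero_of_not_mem ha, List.count_eq_zero_of_not_mem ha2]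
  · intro hp
    have hsets : (PySem.Set.ofList L1).Perm (PySem.Set.ofList L2) := by
      rw [List.perm_ext_iff_of_nodup (PySem.Set.nodup_ofList L1) (PySem.Set.nodup_ofList L2)]
      intro a
      rw [PySem.Set.mem_ofList, PySem.Set.mem_ofList]
      exact hp.mem_iff
    have hpos : 0 < (PySem.Dict.counter L1).size := by
      rw [hsz]
      have : PySem.Set.ofList L1 ≠ [] := by
        intro hc
        cases L1 with
        | nil => exact h1 rfl
        | cons x t =>
          have : x ∈ PySem.Set.ofList (x :: t) := by
            rw [PySem.Set.mem_ofList]; simp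
          rw [hc] at this; simp at this
      cases hl : PySem.Set.ofList L1 with
      | nil => exact absurd hl this
      | cons _ _ => simp
    rw [if_neg]
    · rw [List.all_eq_true]
      intro k hk
      rw [PySem.Dict.keys_counter, PySem.Set.mem_ofList] at hk
      simp only [Bool.and_eq_true, PySem.Dict.contains_counter, List.contains_eq_mem,
        decide_eq_true_eq, beq_iff_eq, PySem.Dict.getD_counter]
      exact ⟨hp.mem_iff.mp hk, by exact_mod_cast hp.count_eq k⟩
    · simp only [Bool.or_eq_true, not_or, bne_iff_ne, ne_eq, not_not, Bool.not_eq_true]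
      constructor
      · simp only [decide_eq_false_iff_not]; omega
      · rw [hsz, hsz]; exact hsets.length_eq
  
-- Nat.toDigits (what str(n) prints) is pvDigits reversed and rendered as characters
lemma toDigitsCore_eq (fuel : Nat) : ∀ n ds, n < fuel →
    Nat.toDigitsCore 10 fuel n ds = ((pvDigits n).map Nat.digitChar).reverse ++ ds := by
  induction fuel with
  | zero => intro n ds h; omega
  | succ f ih =>
    intro n ds h
    by_cases h10 : n / 10 = 0
    · rw [pvDigits, if_pos h10]
      simp [Nat.toDigitsCore, h10]
    · rw [pvDigits, if_neg h10]
      have hlt : n / 10 < f := by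
        have hn : 0 < n := by by_contra hn; simp at hn; omega
        have := Nat.div_lt_self hn (by omega : 1 < 10)
        omega
      simp only [Nat.toDigitsCore, h10, if_false]
      rw [ih (n / 10) _ hlt]
      simp

lemma toChars_eq (num : Int) (h : 0 ≤ num) :
    PySem.Int.toChars num = ((pvDigits num.toNat).map Nat.digitChar).reverse := by
  have hneg : ¬ num < 0 := by omega
  unfold PySem.Int.toChars Nat.toDigits
  rw [if_neg hneg, toDigitsCore_eq _ _ _ (Nat.lt_succ_self _)]
  simp

-- permutation transfers through the two injective digit renderings
lemma perm_map_digitChar_iff (d1 d2 : List Nat) (h1 : ∀ d ∈ d1, d < 10) (h2 : ∀ d ∈ d2, d < 10) :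
    (d1.map Nat.digitChar).Perm (d2.map Nat.digitChar) ↔ d1.Perm d2 := by
  constructor
  · intro hp
    have hback : ∀ l : List Nat, (∀ d ∈ l, d < 10) →
        ((l.map Nat.digitChar).map (fun c => c.toNat - 48)) = l := by
      intro l hl
      rw [List.map_map]
      conv_rhs => rw [← List.map_id l]
      apply List.map_congr_left
      intro d hd
      have := hl d hd
      interval_cases d <;> rfl
    have := hp.map (fun c => c.toNat - 48)
    rwa [hback d1 h1, hback d2 h2] at this
  · exact fun hp => hp.map _

lemma perm_map_intCast_iff (d1 d2 : List Nat) :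
    (d1.map (fun (d : Nat) => (d : Int))).Perm (d2.map (fun (d : Nat) => (d : Int))) ↔ d1.Perm d2 := by
  constructor
  · intro hp
    have hback : ∀ l : List Nat, ((l.map (fun (d : Nat) => (d : Int))).map Int.toNat) = l := by
      intro l; rw [List.map_map]; simp [Function.comp_def]
    have := hp.map Int.toNat
    rwa [hback d1, hback d2] at this
  · exact fun hp => hp.map _

lemma alt_true_iff (int1 int2 : Int) (h1 : 0 ≤ int1) (h2 : 0 ≤ int2) :
    is_same_frequency_alt int1 int2 = true ↔ (pvDigits int1.toNat).Perm (pvDigits int2.toNat) := by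
  unfold is_same_frequency_alt
  rw [beq_iff_eq, PySem.List.sorted_id_eq_sorted_id_iff_perm,
    toChars_eq int1 h1, toChars_eq int2 h2]
  have hrev : ∀ (a b : List Char), (a.reverse.Perm b.reverse ↔ a.Perm b) := by
    intro a b
    exact ⟨fun h => (a.reverse_perm.symm.trans h).trans b.reverse_perm,
           fun h => (a.reverse_perm.trans h).trans b.reverse_perm.symm⟩
  rw [hrev]
  exact perm_map_digitChar_iff _ _ (pvDigits_lt_ten _) (pvDigits_lt_ten _)

lemma a_true_iff (int1 int2 : Int) (h1 : 0 ≤ int1) (h2 : 0 ≤ int2) :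
    is_same_frequency int1 int2 = true ↔ (pvDigits int1.toNat).Perm (pvDigits int2.toNat) := by
  unfold is_same_frequency
  simp only [make_frequency_eq_counter int1 h1, make_frequency_eq_counter int2 h2]
  rw [counter_cmp_iff _ _ (fun hc => pvDigits_ne_nil int1.toNat (by simpa using hc))]
  exact perm_map_intCast_iff _ _

-- ===== VERDICT (by name: the statement is the Claim_ definition above) =====
theorem is_same_frequency_spec : Claim_equal_is_same_frequency := by
  intro int1 int2 _hdom hpre
  obtain ⟨h1, h2⟩ := hpre
  unfold Spec_is_same_frequency
  rw [Bool.eq_iff_iff, a_true_iff int1 int2 h1 h2, alt_true_iff int1 int2 h1 h2]
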